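-- pv_equiv track=rewrite | github.com/theparadoxer02/Data-Structure-and-Algo | Hackerrank/Algorithm/manasa_and_stone.py | manasa
-- ===== SOURCE A (Python) =====
-- def manasa( n, a, b ):
--     s = []
--     if a == b:
--         return [a * ( n -1 )]
--
--     for i in range(0, n):
--         s.append(i*a+(n-i-1)*b)
--
--     s.sort()
--     return s
-- ===== SOURCE B (Python) =====
-- def manasa(n, a, b):
--     # Last-stone values form the arithmetic progression (n-1)*b + i*(a-b);
--     # emit it ascending: start at (n-1)*min(a,b) and add |a-b| each step.
--     if a == b:
--         return [a * (n - 1)]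
--     lo, hi = (a, b) if a < b else (b, a)
--     out = []
--     v = (n - 1) * lo
--     d = hi - lo
--     for _ in range(n):
--         out.append(v)
--         v += d
--     return out
-- ===== Notes on version B (the rewrite author's own statement) =====
-- stated objective: faster
-- what changed: B replaces build-index-list-then-sort with a single counted accumulator loop that emits the arithmetic progression ascending from (n-1)*min(a,b) with step |a-b|: no intermediate index arithmetic per element and no sort (O(n) vs O(n log n)).
import Mathlib
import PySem

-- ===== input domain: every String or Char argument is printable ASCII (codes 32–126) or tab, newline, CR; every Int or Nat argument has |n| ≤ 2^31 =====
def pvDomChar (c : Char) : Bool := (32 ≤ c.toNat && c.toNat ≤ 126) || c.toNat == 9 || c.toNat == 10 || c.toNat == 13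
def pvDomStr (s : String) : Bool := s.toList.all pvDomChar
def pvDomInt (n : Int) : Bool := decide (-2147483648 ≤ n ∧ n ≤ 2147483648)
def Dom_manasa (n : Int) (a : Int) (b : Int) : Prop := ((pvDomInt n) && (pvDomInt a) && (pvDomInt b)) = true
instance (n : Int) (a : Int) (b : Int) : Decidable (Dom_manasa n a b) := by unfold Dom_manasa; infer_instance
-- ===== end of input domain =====

-- B emits the ascending arithmetic progression by a counted accumulator loop instead of building and sorting a list.

-- ===== PORT A =====
def manasa (n : Int) (a : Int) (b : Int) : List Int :=
  -- s = []; if a == b: return [a*(n-1)]; for i in range(0,n): s.append(i*a+(n-i-1)*b); s.sort(); return s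
  if a = b then [a * (n - 1)]
  else
    let s := (PySem.List.pyRange 0 n 1).foldl (fun s i => s ++ [i * a + (n - i - 1) * b]) []
    PySem.List.sorted s (fun x => x) false

-- ===== PORT B =====
-- 'for _ in range(n): out.append(v); v += d' — a counted emission loop
def manasaEmit : Nat → Int → Int → List Int
  | 0, _, _ => []
  | k + 1, v, d => v :: manasaEmit k (v + d) d

def manasa_alt (n : Int) (a : Int) (b : Int) : List Int :=
  if a = b then [a * (n - 1)]
  else
    let lo := if a < b then a else b
    let hi := if a < b then b else a
    manasaEmit n.toNat ((n - 1) * lo) (hi - lo)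

-- ===== PRECONDITION & SPEC =====
def Spec_manasa (n : Int) (a : Int) (b : Int) (out : List Int) : Prop := out = manasa_alt n a b
instance (n : Int) (a : Int) (b : Int) (out : List Int) : Decidable (Spec_manasa n a b out) := by unfold Spec_manasa; infer_instance

-- ===== CLAIM (what is proved, stated in full; the proofs are below) =====
def Claim_equal_manasa : Prop := ∀ (n : Int) (a : Int) (b : Int), Dom_manasa n a b → Spec_manasa n a b (manasa n a b)

-- ===== LEMMAS AND PROOFS =====

-- The emission loop produces the arithmetic progression v, v+d, v+2d, …
lemma emit_eq_map (k : Nat) (v d : Int) :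
    manasaEmit k v d = (List.range k).map (fun (i : Nat) => v + (i : Int) * d) := by
  induction k generalizing v with
  | zero => simp [manasaEmit]
  | succ k ih =>
    rw [List.range_succ_eq_map]
    simp only [manasaEmit, ih, List.map_cons, List.map_map]
    refine List.cons_eq_cons.mpr ⟨by push_cast; ring, ?_⟩
    refine List.map_congr_left fun i _ => ?_
    simp only [Function.comp_apply]
    push_cast; ring

-- The emission loop is strictly increasing when the step is positive.
lemma emit_pairwise (k : Nat) (v d : Int) (hd : 0 < d) :
    (manasaEmit k v d).Pairwise (· < ·) := by
  rw [emit_eq_map]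
  refine List.Pairwise.map _ (fun {i j} (hij : i < j) => ?_) List.pairwise_lt_range
  have : (i : Int) < (j : Int) := by exact_mod_cast hij
  nlinarith

-- A's unsorted list, as a map over List.range.
lemma manasa_s_eq (n a b : Int) :
    (PySem.List.pyRange 0 n 1).foldl (fun s i => s ++ [i * a + (n - i - 1) * b]) []
      = (List.range n.toNat).map (fun (k : Nat) => (k : Int) * a + (n - (k : Int) - 1) * b) := by
  rw [PySem.List.foldl_append_singleton_eq_map, PySem.List.pyRange_one, List.map_map]
  simp only [List.nil_append, Int.sub_zero]
  refine List.map_congr_left fun i _ => ?_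
  simp only [Function.comp_apply]
  ring_nf

-- ===== VERDICT (by name: the statement is the Claim_ definition above) =====
theorem manasa_spec : Claim_equal_manasa := by
  intro n a b _
  unfold Spec_manasa manasa manasa_alt
  by_cases hab : a = b
  · simp [hab]
  · simp only [hab, if_false]
    rw [manasa_s_eq]
    by_cases hlt : a < b
    · -- ascending emission = reverse of A's (strictly decreasing) list
      simp only [hlt, if_true]
      apply PySem.List.sorted_eq_of_perm_of_pairwise_lt _ _ _ _
        (emit_pairwise _ _ _ (by omega))
      have hrev : manasaEmit n.toNat ((n - 1) * a) (b - a)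
          = ((List.range n.toNat).map (fun (k : Nat) => (k : Int) * a + (n - (k : Int) - 1) * b)).reverse := by
        rw [emit_eq_map]
        apply List.ext_getElem (by simp)
        intro j h1 h2
        simp only [List.length_map, List.length_range] at h1 h2
        have hn : (n.toNat : Int) = n := Int.toNat_of_nonneg (by omega)
        rw [List.getElem_map, List.getElem_range, List.getElem_reverse, List.getElem_map,
          List.getElem_range]
        have hc : ((n.toNat - 1 - j : Nat) : Int) = n - 1 - (j : Int) := by omega
        simp only [List.length_map, List.length_range]
        rw [hc]
        ring
      rw [hrev]
      exact List.reverse_perm _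
    · -- A's list is already ascending and equals the emission verbatim
      simp only [hlt, if_false]
      have heq : manasaEmit n.toNat ((n - 1) * b) (a - b)
          = (List.range n.toNat).map (fun (k : Nat) => (k : Int) * a + (n - (k : Int) - 1) * b) := by
        rw [emit_eq_map]
        exact List.map_congr_left fun i _ => by ring
      rw [heq]
      apply PySem.List.sorted_eq_of_perm_of_pairwise_lt _ _ _ (List.Perm.refl _)
      rw [← heq]
      exact emit_pairwise _ _ _ (by omega)
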